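-- pv_equiv track=rewrite | github.com/ravitejapinnaka/2021_leetcoding | uberCodeSignal.py | get_beauty
-- ===== SOURCE A (Python) =====
-- def get_beauty(sub_matrix):
--     sm = sorted(sub_matrix)
--     magic_num = 1
--     for num in sm:
--         if num > magic_num:
--             return magic_num
--         magic_num += 1
--     return magic_num
-- ===== SOURCE B (Python) =====
-- def get_beauty(sub_matrix):
--     n = len(sub_matrix)
--     cnt = {}
--     for v in sub_matrix:
--         k = min(max(v, 0), n + 1)
--         cnt[k] = cnt.get(k, 0) + 1
--     c = cnt.get(0, 0)
--     for m in range(1, n + 1):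
--         c += cnt.get(m, 0)
--         if c < m:
--             return m
--     return n + 1
-- ===== Notes on version B (the rewrite author's own statement) =====
-- stated objective: alternative
-- what changed: Replaces sort-then-scan (first position where sorted[m-1] > m) by a one-pass clamped counting dictionary plus a prefix-sum scan that returns the first m with count(values <= m) < m; asymptotically O(n) instead of O(n log n), but CPython's C sort makes A faster in practice, so no speed is claimed.
import Mathlib
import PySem

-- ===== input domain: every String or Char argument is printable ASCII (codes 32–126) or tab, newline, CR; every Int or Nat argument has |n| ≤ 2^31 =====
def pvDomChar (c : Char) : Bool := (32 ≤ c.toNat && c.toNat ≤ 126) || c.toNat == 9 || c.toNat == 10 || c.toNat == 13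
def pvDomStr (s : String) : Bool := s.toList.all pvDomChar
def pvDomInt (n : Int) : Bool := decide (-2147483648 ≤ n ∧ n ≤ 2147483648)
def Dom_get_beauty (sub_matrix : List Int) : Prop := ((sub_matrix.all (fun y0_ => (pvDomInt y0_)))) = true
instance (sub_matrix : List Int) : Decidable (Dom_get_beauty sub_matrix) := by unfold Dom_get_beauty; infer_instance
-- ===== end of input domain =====

-- B replaces A's sort-then-scan by a one-pass counting dictionary (values clamped into [0, n+1])
-- plus a prefix-sum scan for the first m with count(values ≤ m) < m; objective: alternative algorithm (no sort).

-- ===== PORT A =====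
-- the 'for num in sm' loop with early return, state = magic_num
def goA : List Int → Int → Int
  | [], magic_num => magic_num
  | num :: rest, magic_num => if num > magic_num then magic_num else goA rest (magic_num + 1)

def get_beauty (sub_matrix : List Int) : Int :=
  goA (PySem.List.sorted sub_matrix (fun x => x)) 1

-- ===== PORT B =====
-- k = min(max(v, 0), n + 1)
def clampB (n v : Int) : Int := min (max v 0) (n + 1)

-- the 'for m in range(1, n+1)' loop with early return, state = c
def goB (cnt : PySem.Dict Int Int) (n : Int) : List Int → Int → Int
  | [], _ => n + 1
  | m :: ms, c =>
      let c' := c + cnt.getD m 0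
      if c' < m then m else goB cnt n ms c'

def get_beauty_alt (sub_matrix : List Int) : Int :=
  let n : Int := sub_matrix.length
  let cnt := sub_matrix.foldl
      (fun d v => d.insert (clampB n v) (d.getD (clampB n v) 0 + 1)) PySem.Dict.empty
  goB cnt n (PySem.List.pyRange 1 (n + 1) 1) (cnt.getD 0 0)

-- ===== PRECONDITION & SPEC =====
def Spec_get_beauty (sub_matrix : List Int) (out : Int) : Prop := out = get_beauty_alt sub_matrix
instance (sub_matrix : List Int) (out : Int) : Decidable (Spec_get_beauty sub_matrix out) := by unfold Spec_get_beauty; infer_instance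

-- ===== CLAIM (what is proved, stated in full; the proofs are below) =====
def Claim_equal_get_beauty : Prop := ∀ (sub_matrix : List Int), Dom_get_beauty sub_matrix → Spec_get_beauty sub_matrix (get_beauty sub_matrix)

-- ===== LEMMAS AND PROOFS =====

-- number of elements ≤ j
def cp (xs : List Int) (j : Int) : Nat := xs.countP (fun v => decide (v ≤ j))

-- number of clamped elements ≤ j
def cj (xs : List Int) (n j : Int) : Nat := xs.countP (fun v => decide (clampB n v ≤ j))

lemma cj_eq_cp (xs : List Int) (n j : Int) (h0 : 0 ≤ j) (hn : j ≤ n) : cj xs n j = cp xs j := by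
  unfold cj cp
  apply List.countP_congr
  intro v _
  simp only [decide_eq_true_eq, clampB]
  omega

lemma cnt_getD (xs : List Int) (n j : Int) :
    (xs.foldl (fun d v => d.insert (clampB n v) (d.getD (clampB n v) 0 + 1)) PySem.Dict.empty).getD j 0
      = ((xs.map (clampB n)).count j : Int) := by
  have h : (xs.map (clampB n)).foldl (fun (d : PySem.Dict Int Int) x => d.insert x (d.getD x 0 + 1)) PySem.Dict.empty
      = xs.foldl (fun d v => d.insert (clampB n v) (d.getD (clampB n v) 0 + 1)) PySem.Dict.empty :=
    List.foldl_map ..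
  rw [← h, PySem.Dict.getD_foldl_insert_add_one]
  simp

lemma count_map_clamp (xs : List Int) (n j : Int) :
    (xs.map (clampB n)).count j = xs.countP (fun v => decide (clampB n v = j)) := by
  rw [List.count, List.countP_map]
  apply List.countP_congr
  intro v _
  simp [Function.comp]

lemma cj_succ (xs : List Int) (n m : Int) :
    cj xs n m = cj xs n (m - 1) + xs.countP (fun v => decide (clampB n v = m)) := by
  unfold cj
  induction xs with
  | nil => simp
  | cons a t ih =>
    simp only [List.countP_cons]
    rw [ih]
    by_cases h1 : clampB n a ≤ m - 1
    · have h2 : clampB n a ≤ m := by omega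
      have h3 : ¬ clampB n a = m := by omega
      simp [h1, h2, h3]; omega
    · by_cases h2 : clampB n a = m
      · simp [h2]; omega
      · have h3 : ¬ clampB n a ≤ m := by omega
        simp [h1, h2, h3]

-- B's scan loop: characterization of its result
lemma goB_spec (xs : List Int) (n : Int) (hn : n = (xs.length : Int))
    (cnt : PySem.Dict Int Int)
    (hcnt : ∀ j, cnt.getD j 0 = (xs.countP (fun v => decide (clampB n v = j)) : Int)) :
    ∀ (k : Nat) (m : Int), 1 ≤ m → m + (k : Int) = n + 1 →
    ∀ c, c = (cj xs n (m - 1) : Int) →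
    (∀ j, m ≤ j → j < goB cnt n (PySem.List.pyRange m (n + 1) 1) c → (j ≤ (cp xs j : Int))) ∧
    (goB cnt n (PySem.List.pyRange m (n + 1) 1) c ≤ n → ((cp xs (goB cnt n (PySem.List.pyRange m (n + 1) 1) c) : Int) < goB cnt n (PySem.List.pyRange m (n + 1) 1) c)) ∧
    m ≤ goB cnt n (PySem.List.pyRange m (n + 1) 1) c ∧
    goB cnt n (PySem.List.pyRange m (n + 1) 1) c ≤ n + 1 := by
  intro k
  induction k with
  | zero =>
    intro m hm hk c hc
    have hr : PySem.List.pyRange m (n + 1) 1 = [] := PySem.List.pyRange_one_eq_nil (by omega)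
    rw [hr]
    simp only [goB]
    refine ⟨by omega, by omega, by omega, by omega⟩
  | succ k ih =>
    intro m hm hk c hc
    have hmn : m < n + 1 := by omega
    rw [PySem.List.pyRange_one_cons hmn]
    simp only [goB]
    have hc' : c + cnt.getD m 0 = (cj xs n m : Int) := by
      rw [hc, hcnt, cj_succ xs n m]; push_cast; ring
    have hcpm : c + cnt.getD m 0 = (cp xs m : Int) := by
      rw [hc', cj_eq_cp xs n m (by omega) (by omega)]
    by_cases hlt : c + cnt.getD m 0 < m
    · simp only [hlt, if_true]
      refine ⟨fun j hj1 hj2 => by omega, fun _ => by omega, by omega, by omega⟩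
    · simp only [hlt, if_false]
      obtain ⟨h1, h2, h3, h4⟩ := ih (m + 1) (by omega) (by omega) (c + cnt.getD m 0)
        (by rw [hc']; norm_num)
      refine ⟨?_, h2, by omega, h4⟩
      intro j hj1 hj2
      rcases eq_or_lt_of_le hj1 with h | h
      · subst h; omega
      · exact h1 j (by omega) hj2

-- A's loop: on any list, goA either runs off the end (all elements passed) or stops
-- at the first element exceeding its counter
lemma goA_spec (xs : List Int) : ∀ m : Int,
    (goA xs m = m + (xs.length : Int) ∧ ∀ i (h : i < xs.length), xs[i] ≤ m + (i : Int)) ∨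
    (∃ i, ∃ h : i < xs.length, goA xs m = m + (i : Int) ∧ m + (i : Int) < xs[i] ∧
      ∀ j (hj : j < i), xs[j] ≤ m + (j : Int)) := by
  induction xs with
  | nil => intro m; left; simp [goA]
  | cons a t ih =>
    intro m
    by_cases ha : a > m
    · right
      exact ⟨0, by simp, by simp [goA, ha], by simpa using ha, by omega⟩
    · rcases ih (m + 1) with ⟨h1, h2⟩ | ⟨i, hi, h1, h2, h3⟩
      · left
        constructor
        · simp [goA, ha, h1]; ring
        · intro i hlen
          cases i with
          | zero => simpa using by omega
          | succ j =>
            have := h2 j (by simpa using hlen)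
            simp only [List.getElem_cons_succ]
            push_cast at this ⊢; omega
      · right
        refine ⟨i + 1, by simpa using hi, ?_, ?_, ?_⟩
        · simp [goA, ha, h1]; ring
        · simp only [List.getElem_cons_succ]; omega
        · intro j hj
          cases j with
          | zero => simpa using by omega
          | succ j' =>
            have := h3 j' (by omega)
            simp only [List.getElem_cons_succ]
            push_cast at this ⊢; omega

-- from a sorted list: if the (j-1)-th element is ≤ j then at least j elements are ≤ j
lemma cp_lower (sm : List Int) (jn : Nat) (hlen : jn ≤ sm.length)
    (h : ∀ i (hi : i < jn), sm[i]'(by omega) ≤ 1 + (i : Int)) : -- uses only indices < jn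
    jn ≤ cp sm (jn : Int) := by
  unfold cp
  have htake : (sm.take jn).countP (fun v => decide (v ≤ (jn : Int))) = jn := by
    rw [List.countP_eq_length.mpr, List.length_take]
    · omega
    · intro v hv
      obtain ⟨i, hi, hvi⟩ := List.mem_take_iff_getElem.mp hv
      have hij : i < jn := by omega
      have : sm[i]'(by omega) ≤ 1 + (i : Int) := h i hij
      subst hvi
      simp only [decide_eq_true_eq]
      omega
  calc jn = (sm.take jn).countP (fun v => decide (v ≤ (jn : Int))) := htake.symm
    _ ≤ sm.countP (fun v => decide (v ≤ (jn : Int))) :=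
        (List.take_sublist jn sm).countP_le

-- from a sorted list: if the (r-1)-th element is > r then fewer than r elements are ≤ r
lemma cp_upper (sm : List Int) (i : Nat) (hi : i < sm.length)
    (hbig : 1 + (i : Int) < sm[i])
    (hmono : ∀ p q (hp : p ≤ q) (hq : q < sm.length), sm[p]'(by omega) ≤ sm[q]) :
    (cp sm (1 + (i : Int)) : Int) < 1 + (i : Int) := by
  unfold cp
  have hsplit : sm.countP (fun v => decide (v ≤ 1 + (i : Int)))
      = (sm.take i).countP (fun v => decide (v ≤ 1 + (i : Int)))
        + (sm.drop i).countP (fun v => decide (v ≤ 1 + (i : Int))) := by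
    rw [← List.countP_append, List.take_append_drop]
  have hdrop : (sm.drop i).countP (fun v => decide (v ≤ 1 + (i : Int))) = 0 := by
    rw [List.countP_eq_zero]
    intro v hv
    obtain ⟨j, hj, hvj⟩ := List.mem_iff_getElem.mp hv
    have hjlen : i + j < sm.length := by
      have hdl := List.length_drop (l := sm) (i := i)
      omega
    rw [List.getElem_drop] at hvj
    have : sm[i] ≤ sm[i + j]'hjlen := hmono i (i + j) (by omega) hjlen
    subst hvj
    simp only [decide_eq_true_eq]
    omega
  have htake : (sm.take i).countP (fun v => decide (v ≤ 1 + (i : Int))) ≤ i := by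
    calc (sm.take i).countP _ ≤ (sm.take i).length := List.countP_le_length
      _ ≤ i := by simp
  rw [hsplit, hdrop]
  omega

-- A's result satisfies the same two counting facts, over the ORIGINAL list (counts are
-- permutation-invariant under sorting)
lemma A_facts (xs : List Int) :
    (∀ j, 1 ≤ j → j < get_beauty xs → (j ≤ (cp xs j : Int))) ∧
    (get_beauty xs ≤ (xs.length : Int) → ((cp xs (get_beauty xs) : Int) < get_beauty xs)) ∧
    1 ≤ get_beauty xs ∧ get_beauty xs ≤ (xs.length : Int) + 1 := by
  set sm := PySem.List.sorted xs (fun x => x) with hsm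
  have hperm : sm.Perm xs := PySem.List.sorted_perm xs (fun x => x) false
  have hlen : sm.length = xs.length := hperm.length_eq
  have hcp : ∀ j, cp sm j = cp xs j := fun j => hperm.countP_eq _
  have hmono : ∀ p q (hp : p ≤ q) (hq : q < sm.length), sm[p]'(by omega) ≤ sm[q] := by
    intro p q hp hq
    exact PySem.List.sorted_id_getElem_mono xs hp hq
  have hA : get_beauty xs = goA sm 1 := rfl
  rcases goA_spec sm 1 with ⟨h1, h2⟩ | ⟨i, hi, h1, h2, h3⟩
  · rw [hA, h1]
    refine ⟨?_, by omega, by omega, by omega⟩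
    intro j hj1 hj2
    have hj3 : j.toNat ≤ sm.length := by omega
    have := cp_lower sm j.toNat hj3 (fun i hi => h2 i (by omega))
    rw [hcp] at this
    have hjj : ((j.toNat : Int)) = j := by omega
    calc j = ((j.toNat : Nat) : Int) := by omega
      _ ≤ (cp xs ((j.toNat : Nat) : Int) : Int) := by exact_mod_cast this
      _ = (cp xs j : Int) := by rw [hjj]
  · rw [hA, h1]
    refine ⟨?_, ?_, by omega, by omega⟩
    · intro j hj1 hj2
      have hj3 : j.toNat ≤ sm.length := by omega
      have := cp_lower sm j.toNat hj3 (fun i' hi' => h3 i' (by omega))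
      rw [hcp] at this
      have hjj : ((j.toNat : Int)) = j := by omega
      calc j = ((j.toNat : Nat) : Int) := by omega
        _ ≤ (cp xs ((j.toNat : Nat) : Int) : Int) := by exact_mod_cast this
        _ = (cp xs j : Int) := by rw [hjj]
    · intro _
      have := cp_upper sm i hi h2 hmono
      rw [hcp] at this
      exact this

-- B's result satisfies the same facts
lemma B_facts (xs : List Int) :
    (∀ j, 1 ≤ j → j < get_beauty_alt xs → (j ≤ (cp xs j : Int))) ∧
    (get_beauty_alt xs ≤ (xs.length : Int) → ((cp xs (get_beauty_alt xs) : Int) < get_beauty_alt xs)) ∧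
    1 ≤ get_beauty_alt xs ∧ get_beauty_alt xs ≤ (xs.length : Int) + 1 := by
  set n : Int := (xs.length : Int) with hn
  set cnt := xs.foldl (fun d v => d.insert (clampB n v) (d.getD (clampB n v) 0 + 1)) (PySem.Dict.empty : PySem.Dict Int Int) with hcntdef
  have hcnt : ∀ j, cnt.getD j 0 = (xs.countP (fun v => decide (clampB n v = j)) : Int) := by
    intro j
    rw [hcntdef, cnt_getD, count_map_clamp]
  have hcc : xs.countP (fun v => decide (clampB n v = 0)) = cj xs n 0 := by
    unfold cj
    apply List.countP_congr
    intro v _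
    simp only [decide_eq_true_eq, clampB]
    omega
  have hc0 : cnt.getD 0 0 = (cj xs n (1 - 1) : Int) := by
    rw [hcnt 0, hcc]
    norm_num
  have hB : get_beauty_alt xs = goB cnt n (PySem.List.pyRange 1 (n + 1) 1) (cnt.getD 0 0) := rfl
  obtain ⟨h1, h2, h3, h4⟩ := goB_spec xs n rfl cnt hcnt xs.length 1 (by omega) (by omega)
      (cnt.getD 0 0) hc0
  rw [hB]
  exact ⟨h1, h2, by omega, h4⟩

-- ===== VERDICT (by name: the statement is the Claim_ definition above) =====
theorem get_beauty_spec : Claim_equal_get_beauty := by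
  intro xs _
  unfold Spec_get_beauty
  obtain ⟨ha1, ha2, ha3, ha4⟩ := A_facts xs
  obtain ⟨hb1, hb2, hb3, hb4⟩ := B_facts xs
  rcases lt_trichotomy (get_beauty xs) (get_beauty_alt xs) with h | h | h
  · exfalso
    have hle : get_beauty xs ≤ (xs.length : Int) := by omega
    have := ha2 hle
    have := hb1 (get_beauty xs) ha3 h
    omega
  · exact h
  · exfalso
    have hle : get_beauty_alt xs ≤ (xs.length : Int) := by omega
    have := hb2 hle
    have := ha1 (get_beauty_alt xs) hb3 h
    omega
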